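-- pv_equiv track=rewrite | github.com/Biewoom/Algorithms | Kakao.2018_blind/셔틀버스.py | CheckMyTime
-- ===== SOURCE A (Python) =====
-- from collections import defaultdict
--
-- def CheckMyTime(lastBus, Queue, Crews, capacity):
--     while Crews and Crews[0] <= lastBus:
--         Queue.append(Crews.pop(0))
--
--     if len(Queue) < capacity:
--         return lastBus
--     else:
--         TimeMap = defaultdict(int)
--         for time in Queue: TimeMap[time] += 1
--
--         TimeCandidates = sorted(TimeMap.keys())
--
--         count = i = 0
--         while count + TimeMap[ TimeCandidates[i] ] < capacity:
--             count += TimeMap[ TimeCandidates[i] ]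
--             i += 1
--         MyTime = TimeCandidates[i] - 1
--         return MyTime
-- ===== SOURCE B (Python) =====
-- def CheckMyTime(lastBus, Queue, Crews, capacity):
--     i = 0
--     n = len(Crews)
--     while i < n and Crews[i] <= lastBus:
--         i += 1
--     Queue += Crews[:i]
--     del Crews[:i]
--     if len(Queue) < capacity:
--         return lastBus
--     return sorted(Queue)[capacity - 1] - 1
-- ===== Notes on version B (the rewrite author's own statement) =====
-- stated objective: faster
-- what changed: B replaces A's repeated Crews.pop(0) loop and counter-dict candidate scan with a single prefix scan plus one slice splice and a direct sorted(Queue)[capacity-1]-1 closed form.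
-- outside the precondition, e.g. on CheckMyTime(5, [3, 7], [], 0): A returns 2, B returns 6
import Mathlib
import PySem

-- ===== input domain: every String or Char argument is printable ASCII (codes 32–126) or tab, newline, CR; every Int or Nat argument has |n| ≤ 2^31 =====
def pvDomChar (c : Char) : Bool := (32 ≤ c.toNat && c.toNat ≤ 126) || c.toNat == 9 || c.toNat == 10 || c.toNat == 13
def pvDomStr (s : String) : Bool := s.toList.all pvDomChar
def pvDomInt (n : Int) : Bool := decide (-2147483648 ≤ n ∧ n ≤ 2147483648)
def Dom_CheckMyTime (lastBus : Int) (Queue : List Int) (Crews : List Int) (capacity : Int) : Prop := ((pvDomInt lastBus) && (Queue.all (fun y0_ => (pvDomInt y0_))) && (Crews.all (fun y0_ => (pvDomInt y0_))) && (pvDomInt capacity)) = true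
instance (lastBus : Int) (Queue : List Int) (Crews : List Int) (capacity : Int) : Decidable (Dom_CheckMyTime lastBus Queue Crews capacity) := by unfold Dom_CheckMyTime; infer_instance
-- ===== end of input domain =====

-- ===== PORT A =====
-- One honest line: B scans the boardable crew prefix once and indexes the sorted queue
-- directly, instead of A's repeated pop(0) and counter-dict candidate walk; proved equal
-- for capacity >= 1 (return value only; both Pythons mutate Queue/Crews identically).

-- A's 'while Crews and Crews[0] <= lastBus: Queue.append(Crews.pop(0))'
def pvPopLoop (Queue : List Int) (Crews : List Int) (lastBus : Int) : List Int :=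
  match Crews with
  | [] => Queue
  | c :: rest => if c ≤ lastBus then pvPopLoop (Queue ++ [c]) rest lastBus else Queue

-- A's 'count = i = 0; while count + TimeMap[TimeCandidates[i]] < capacity: ...; return TimeCandidates[i] - 1'
-- (recursion over the candidate list mirrors the index i; [] = where Python raises IndexError, unreachable under Pre_)
def pvScanLoop (cands : List Int) (tm : PySem.Dict Int Int) (count capacity : Int) : Int :=
  match cands with
  | [] => 0
  | t :: rest =>
      if count + tm.getD t 0 < capacity then pvScanLoop rest tm (count + tm.getD t 0) capacity
      else t - 1

def CheckMyTime (lastBus : Int) (Queue : List Int) (Crews : List Int) (capacity : Int) : Int :=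
  let q := pvPopLoop Queue Crews lastBus
  if (q.length : Int) < capacity then lastBus
  else
    let tm := q.foldl (fun d x => d.modify x 0 (· + 1)) PySem.Dict.empty
    let cands := PySem.List.sorted tm.keys (fun x => x) false
    pvScanLoop cands tm 0 capacity

-- ===== PORT B =====
-- Source B's 'i = 0; while i < n and Crews[i] <= lastBus: i += 1'
def pvPrefLen (Crews : List Int) (lastBus : Int) : Nat :=
  match Crews with
  | [] => 0
  | c :: rest => if c ≤ lastBus then pvPrefLen rest lastBus + 1 else 0

def CheckMyTime_alt (lastBus : Int) (Queue : List Int) (Crews : List Int) (capacity : Int) : Int :=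
  let i := pvPrefLen Crews lastBus
  let q := Queue ++ Crews.take i
  if (q.length : Int) < capacity then lastBus
  else (PySem.List.pyGet? (PySem.List.sorted q (fun x => x) false) (capacity - 1)).getD 0 - 1

-- ===== PRECONDITION & SPEC =====
-- Pre_ restricts to the natural domain capacity >= 1: for capacity <= 0 A either raises
-- IndexError (empty combined queue) or returns min-1 by a degenerate fall-through, while
-- B's negative index reads the last element; neither value is specified for a bus of
-- non-positive capacity.
def Pre_CheckMyTime (lastBus : Int) (Queue : List Int) (Crews : List Int) (capacity : Int) : Prop :=
  1 ≤ capacity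
instance (lastBus : Int) (Queue : List Int) (Crews : List Int) (capacity : Int) : Decidable (Pre_CheckMyTime lastBus Queue Crews capacity) := by unfold Pre_CheckMyTime; infer_instance

def pvWitness_CheckMyTime : Int × List Int × List Int × Int := (10, [1, 2], [3, 4, 11], 3)

def Spec_CheckMyTime (lastBus : Int) (Queue : List Int) (Crews : List Int) (capacity : Int) (out : Int) : Prop := out = CheckMyTime_alt lastBus Queue Crews capacity
instance (lastBus : Int) (Queue : List Int) (Crews : List Int) (capacity : Int) (out : Int) : Decidable (Spec_CheckMyTime lastBus Queue Crews capacity out) := by unfold Spec_CheckMyTime; infer_instance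

-- ===== CLAIM (what is proved, stated in full; the proofs are below) =====
def Claim_equal_CheckMyTime : Prop := ∀ (lastBus : Int) (Queue : List Int) (Crews : List Int) (capacity : Int), Dom_CheckMyTime lastBus Queue Crews capacity → Pre_CheckMyTime lastBus Queue Crews capacity → Spec_CheckMyTime lastBus Queue Crews capacity (CheckMyTime lastBus Queue Crews capacity)

-- ===== LEMMAS AND PROOFS =====

-- A's pop loop produces Queue ++ (the boardable prefix of Crews)
theorem pvPopLoop_eq (Crews : List Int) : ∀ (Queue : List Int) (lastBus : Int),
    pvPopLoop Queue Crews lastBus = Queue ++ Crews.take (pvPrefLen Crews lastBus) := by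
  induction Crews with
  | nil => intro Q lb; simp [pvPopLoop, pvPrefLen]
  | cons c rest ih =>
      intro Q lb
      by_cases h : c ≤ lb
      · simp [pvPopLoop, pvPrefLen, h, ih]
      · simp [pvPopLoop, pvPrefLen, h]

-- the expansion of candidate values by their multiplicities in the dict
def pvExpand (cands : List Int) (tm : PySem.Dict Int Int) : List Int :=
  cands.flatMap (fun c => List.replicate (tm.getD c 0).toNat c)

theorem pvScanLoop_getD (cands : List Int) : ∀ (tm : PySem.Dict Int Int) (count capacity : Int),
    (∀ c ∈ cands, 0 ≤ tm.getD c 0) →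
    1 ≤ capacity - count → capacity - count ≤ ((pvExpand cands tm).length : Int) →
    pvScanLoop cands tm count capacity = (pvExpand cands tm).getD (capacity - count - 1).toNat 0 - 1 := by
  induction cands with
  | nil => intro tm count cap _ h1 h2; simp [pvExpand] at h2; omega
  | cons t rest ih =>
      intro tm count cap hnn h1 h2
      have hg : ((tm.getD t 0).toNat : Int) = tm.getD t 0 :=
        Int.toNat_of_nonneg (hnn t (by simp))
      have hexp : pvExpand (t :: rest) tm
          = List.replicate (tm.getD t 0).toNat t ++ pvExpand rest tm := by
        simp [pvExpand]
      have hlen2 : (pvExpand (t :: rest) tm).length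
          = (tm.getD t 0).toNat + (pvExpand rest tm).length := by
        rw [hexp]; simp
      by_cases h : count + tm.getD t 0 < cap
      · have hk : (tm.getD t 0).toNat ≤ (cap - count - 1).toNat := by omega
        rw [pvScanLoop, if_pos h,
          ih tm (count + tm.getD t 0) cap (fun c hc => hnn c (by simp [hc])) (by omega) (by omega),
          hexp, List.getD_append_right _ _ _ _ (by simpa using hk)]
        have hidxeq : (cap - count - 1).toNat - (List.replicate (tm.getD t 0).toNat t).length
            = (cap - (count + tm.getD t 0) - 1).toNat := by
          simp only [List.length_replicate]; omega
        rw [hidxeq]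
      · have hlt : (cap - count - 1).toNat < (tm.getD t 0).toNat := by omega
        rw [pvScanLoop, if_neg h, hexp,
          List.getD_append _ _ _ _ (by simp only [List.length_replicate]; exact hlt)]
        simp only [List.getD, List.getElem?_replicate]
        rw [if_pos hlt]
        simp

-- counts agree elementwise, hence the expansion is a permutation of q
theorem pvExpand_count (cands : List Int) (tm : PySem.Dict Int Int) (hnd : cands.Nodup) (v : Int) :
    (pvExpand cands tm).count v = if v ∈ cands then (tm.getD v 0).toNat else 0 := by
  induction cands with
  | nil => simp [pvExpand]
  | cons t rest ih =>
      simp only [List.nodup_cons] at hnd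
      have hx : pvExpand (t :: rest) tm
          = List.replicate (tm.getD t 0).toNat t ++ pvExpand rest tm := by simp [pvExpand]
      rw [hx, List.count_append, List.count_replicate, ih hnd.2]
      by_cases hv : v = t
      · subst hv; simp [hnd.1]
      · simp [hv, Ne.symm hv]

theorem pvExpand_pairwise (cands : List Int) (tm : PySem.Dict Int Int)
    (h : cands.Pairwise (· < ·)) : (pvExpand cands tm).Pairwise (fun a b => a ≤ b) := by
  induction cands with
  | nil => simp [pvExpand]
  | cons t rest ih =>
      rw [List.pairwise_cons] at h
      have hx : pvExpand (t :: rest) tm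
          = List.replicate (tm.getD t 0).toNat t ++ pvExpand rest tm := by simp [pvExpand]
      rw [hx, List.pairwise_append]
      refine ⟨List.pairwise_replicate.mpr (Or.inr le_rfl), ih h.2, ?_⟩
      intro a ha b hb
      rw [List.eq_of_mem_replicate ha]
      simp only [pvExpand, List.mem_flatMap] at hb
      obtain ⟨c, hc1, hc2⟩ := hb
      rw [List.eq_of_mem_replicate hc2]
      exact le_of_lt (h.1 c hc1)

theorem pvExpand_sorted_counter (q : List Int) :
    pvExpand (PySem.List.sorted (PySem.Set.ofList q) (fun x => x) false) (PySem.Dict.counter q)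
      = PySem.List.sorted q (fun x => x) false := by
  set cands := PySem.List.sorted (PySem.Set.ofList q) (fun x => x) false with hc
  have hnd : cands.Nodup := (PySem.List.sorted_perm _ _ _).nodup_iff.mpr (PySem.Set.nodup_ofList q)
  have hperm : (pvExpand cands (PySem.Dict.counter q)).Perm q := by
    rw [List.perm_iff_count]
    intro v
    rw [pvExpand_count cands _ hnd v]
    by_cases hv : v ∈ q
    · have hmem : v ∈ cands := by
        rw [hc, PySem.List.mem_sorted]; exact (PySem.Set.mem_ofList q v).mpr hv
      simp [hmem, PySem.Dict.getD_counter]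
    · have hmem : v ∉ cands := by
        rw [hc, PySem.List.mem_sorted]
        exact fun h => hv ((PySem.Set.mem_ofList q v).mp h)
      simp [hmem, List.count_eq_zero_of_not_mem hv]
  have hpw : (pvExpand cands (PySem.Dict.counter q)).Pairwise (fun a b => a ≤ b) :=
    pvExpand_pairwise cands (PySem.Dict.counter q)
      (hc ▸ PySem.List.sorted_ofList_pairwise_lt q)
  exact (PySem.List.sorted_id_eq_of_perm_of_pairwise q (pvExpand cands (PySem.Dict.counter q))
    hperm hpw).symm

-- ===== VERDICT (by name: the statement is the Claim_ definition above) =====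
theorem CheckMyTime_spec : Claim_equal_CheckMyTime := by
  intro lastBus Queue Crews capacity _ hpre
  have hcap : 1 ≤ capacity := hpre
  unfold Spec_CheckMyTime
  simp only [CheckMyTime, CheckMyTime_alt]
  rw [pvPopLoop_eq]
  set q := Queue ++ Crews.take (pvPrefLen Crews lastBus) with hq
  by_cases hlen : (q.length : Int) < capacity
  · rw [if_pos hlen, if_pos hlen]
  · rw [if_neg hlen, if_neg hlen, ← PySem.Dict.counter_eq_foldl, PySem.Dict.keys_counter]
    have hnn : ∀ c ∈ PySem.List.sorted (PySem.Set.ofList q) (fun x => x) false,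
        0 ≤ (PySem.Dict.counter q).getD c 0 := by
      intro c _; rw [PySem.Dict.getD_counter]; exact Int.natCast_nonneg _
    have hslen : (PySem.List.sorted q (fun x => x) false).length = q.length :=
      PySem.List.length_sorted q _ _
    have hexplen : ((pvExpand (PySem.List.sorted (PySem.Set.ofList q) (fun x => x) false)
        (PySem.Dict.counter q)).length : Int) = (q.length : Int) := by
      rw [pvExpand_sorted_counter q, hslen]
    rw [pvScanLoop_getD _ (PySem.Dict.counter q) 0 capacity hnn (by omega) (by omega),
      pvExpand_sorted_counter q]
    have h10 : capacity - 0 - 1 = capacity - 1 := by ring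
    rw [h10, PySem.List.pyGet?_of_nonneg _ (by omega : (0:Int) ≤ capacity - 1)]
    have hidx : (capacity - 1).toNat < (PySem.List.sorted q (fun x => x) false).length := by omega
    rw [List.getElem?_eq_getElem hidx, Option.getD_some, List.getD_eq_getElem _ _ hidx]
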